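-- pv_equiv track=rewrite | github.com/jack-345/CPSC322-Semester-Project | mysklearn/myclassifiers.py | _check_for_clashes
-- ===== SOURCE A (Python) =====
-- def _check_for_clashes(train_data):
--     # ... (check_for_clashes method remains the same)
--     seen = {}
--     for row in train_data:
--         attributes = tuple(row[:-1])
--         label = row[-1]
--         if attributes in seen:
--             if seen[attributes] != label:
--                 return True
--         else:
--             seen[attributes] = label
--     return False
-- ===== SOURCE B (Python) =====
-- def _check_for_clashes(train_data):
--     prefixes = {tuple(row[:-1]) for row in train_data}
--     pairs = {(tuple(row[:-1]), row[-1]) for row in train_data}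
--     return len(pairs) > len(prefixes)
-- ===== Notes on version B (the rewrite author's own statement) =====
-- stated objective: simpler
-- what changed: Replaces the incremental dict-with-early-return scan by two set comprehensions (distinct attribute prefixes, distinct prefix-label pairs) and a single cardinality comparison: a clash exists iff there are more distinct pairs than distinct prefixes.
-- outside the precondition, e.g. on _check_for_clashes([['a', 'x'], ['a', 'y'], []]): A returns True, B raises IndexError
import Mathlib
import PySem

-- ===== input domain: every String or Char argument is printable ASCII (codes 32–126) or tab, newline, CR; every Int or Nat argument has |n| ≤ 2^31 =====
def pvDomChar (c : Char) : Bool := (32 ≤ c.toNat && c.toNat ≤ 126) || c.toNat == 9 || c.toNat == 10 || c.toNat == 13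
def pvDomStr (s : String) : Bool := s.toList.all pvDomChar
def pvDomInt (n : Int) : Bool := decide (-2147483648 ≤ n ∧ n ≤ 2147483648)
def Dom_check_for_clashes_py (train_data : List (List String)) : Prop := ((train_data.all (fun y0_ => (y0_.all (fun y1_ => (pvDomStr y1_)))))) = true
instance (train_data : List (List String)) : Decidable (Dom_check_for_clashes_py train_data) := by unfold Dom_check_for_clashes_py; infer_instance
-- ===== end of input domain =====

-- B replaces A's incremental dict-with-early-return scan by comparing the counts of distinct
-- attribute prefixes and of distinct (prefix, label) pairs; objective: simpler. Not faster.


-- ===== PORT A =====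
-- the 'for row in train_data' loop with the accumulating dict 'seen' and the early 'return True'
def clashLoopA (seen : PySem.Dict (List String) String) : List (List String) → Bool
  | [] => false
  | row :: rest =>
    let attributes := PySem.List.slice row none (some (-1))   -- tuple(row[:-1])
    let label := PySem.List.pyGetD row (-1) ""                -- row[-1]; total under Pre_ (row ≠ [])
    match seen.get? attributes with                           -- 'attributes in seen' + 'seen[attributes]'
    | some v => if v ≠ label then true else clashLoopA seen rest
    | none => clashLoopA (seen.insert attributes label) rest

def check_for_clashes_py (train_data : List (List String)) : Bool :=
  clashLoopA PySem.Dict.empty train_data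

-- ===== PORT B =====
def check_for_clashes_py_alt (train_data : List (List String)) : Bool :=
  let prefixes : PySem.Set (List String) :=
    PySem.Set.ofList (train_data.map (fun row => PySem.List.slice row none (some (-1))))
  let pairs : PySem.Set (List String × String) :=
    PySem.Set.ofList (train_data.map (fun row =>
      (PySem.List.slice row none (some (-1)), PySem.List.pyGetD row (-1) "")))
  decide (PySem.Set.len prefixes < PySem.Set.len pairs)

-- ===== PRECONDITION & SPEC =====
-- Pre_ excludes inputs containing an empty row: B's set comprehension evaluates row[-1] on every
-- row and raises IndexError there, while A either raises the same IndexError or returns True early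
-- if a clash among the preceding rows is found first.
def Pre_check_for_clashes_py (train_data : List (List String)) : Prop :=
  ∀ row ∈ train_data, row ≠ []
instance (train_data : List (List String)) : Decidable (Pre_check_for_clashes_py train_data) := by
  unfold Pre_check_for_clashes_py; infer_instance

def pvWitness_check_for_clashes_py : List (List String) :=
  [["sunny", "hot", "yes"], ["sunny", "hot", "yes"], ["rainy", "mild", "no"]]

def Spec_check_for_clashes_py (train_data : List (List String)) (out : Bool) : Prop := out = check_for_clashes_py_alt train_data
instance (train_data : List (List String)) (out : Bool) : Decidable (Spec_check_for_clashes_py train_data out) := by unfold Spec_check_for_clashes_py; infer_instance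

-- ===== CLAIM (what is proved, stated in full; the proofs are below) =====
def Claim_equal_check_for_clashes_py : Prop := ∀ (train_data : List (List String)), Dom_check_for_clashes_py train_data → Pre_check_for_clashes_py train_data → Spec_check_for_clashes_py train_data (check_for_clashes_py train_data)

-- ===== LEMMAS AND PROOFS =====

-- the projection both programs apply to each row
def rowPair (row : List String) : List String × String :=
  (PySem.List.slice row none (some (-1)), PySem.List.pyGetD row (-1) "")

-- "no clash": every two pairs with the same prefix carry the same label
def PairFun (l : List (List String × String)) : Prop :=
  ∀ p ∈ l, ∀ q ∈ l, p.1 = q.1 → p.2 = q.2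

-- Bool form of PairFun (no global Decidable instance is declared for it)
def PairFunB (l : List (List String × String)) : Bool :=
  @decide (PairFun l) (by unfold PairFun; infer_instance)

lemma pairFunB_iff (l : List (List String × String)) : PairFunB l = true ↔ PairFun l := by
  simp [PairFunB]

lemma pairFunB_false_iff (l : List (List String × String)) :
    PairFunB l = false ↔ ¬ PairFun l := by
  rw [← pairFunB_iff]
  simp

lemma pairFun_append_singleton_iff {m : List (List String × String)} {a : List String} {b : String}
    (hm : PairFun m) (hmem : ∀ w, (a, w) ∈ m → w = b) :
    PairFun (m ++ [(a, b)]) := by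
  intro p hp q hq hpq
  rcases List.mem_append.mp hp with hp | hp <;> rcases List.mem_append.mp hq with hq | hq
  · exact hm p hp q hq hpq
  · simp at hq; subst hq
    have hp' : (a, p.2) ∈ m := by
      have hpe : p = (a, p.2) := Prod.ext (by simpa using hpq) rfl
      rwa [← hpe]
    simpa using hmem p.2 hp'
  · simp at hp; subst hp
    have hq' : (a, q.2) ∈ m := by
      have hqe : q = (a, q.2) := Prod.ext (by simpa using hpq.symm) rfl
      rwa [← hqe]
    simpa using (hmem q.2 hq').symm
  · simp at hp hq; subst hp; subst hq; rfl

-- A's loop, characterised: with 'seen' the dict of the already-processed pairs m (PairFun so far),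
-- the loop returns true exactly when PairFun fails on m ++ the remaining pairs.
lemma clashLoopA_eq (rows : List (List String)) :
    ∀ (m : List (List String × String)) (seen : PySem.Dict (List String) String),
      (∀ k v, seen.get? k = some v ↔ (k, v) ∈ m) → PairFun m →
      clashLoopA seen rows = !PairFunB (m ++ rows.map rowPair) := by
  induction rows with
  | nil =>
    intro m seen _ hm
    simp [clashLoopA, (pairFunB_iff m).mpr hm]
  | cons row rest ih =>
    intro m seen hinv hm
    rcases hp : seen.get? (PySem.List.slice row none (some (-1))) with _ | v
    · -- key not seen: insert, the processed list grows by rowPair row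
      have hfresh : ∀ w, (PySem.List.slice row none (some (-1)), w) ∈ m → False := by
        intro w hw
        have := (hinv _ w).mpr hw
        simp [hp] at this
      have hinv' : ∀ k v,
          (seen.insert (PySem.List.slice row none (some (-1)))
            (PySem.List.pyGetD row (-1) "")).get? k = some v ↔ (k, v) ∈ m ++ [rowPair row] := by
        intro k v
        by_cases hk : k = PySem.List.slice row none (some (-1))
        · subst hk
          rw [PySem.Dict.get?_insert_self]
          constructor
          · intro h
            simp at h
            simp [rowPair, ← h]
          · intro h
            rcases List.mem_append.mp h with h | h
            · exact absurd h (hfresh v)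
            · simp [rowPair] at h; simp [h]
        · rw [PySem.Dict.get?_insert_of_ne _ _ hk]
          rw [hinv k v]
          simp [rowPair, hk]
      have hm' : PairFun (m ++ [rowPair row]) :=
        pairFun_append_singleton_iff hm (fun w hw => absurd hw (hfresh w))
      have := ih (m ++ [rowPair row]) _ hinv' hm'
      simpa [clashLoopA, hp, rowPair] using this
    · -- key already seen with value v
      by_cases hv : v = PySem.List.pyGetD row (-1) ""
      · -- same label: skip, but the processed list still grows by rowPair row (a duplicate-key pair)
        have hmem : ∀ w, (PySem.List.slice row none (some (-1)), w) ∈ m →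
            w = PySem.List.pyGetD row (-1) "" := by
          intro w hw
          have h1 := (hinv _ v).mp hp
          exact hv ▸ hm _ hw _ h1 rfl
        have hm' : PairFun (m ++ [rowPair row]) := pairFun_append_singleton_iff hm hmem
        have hinv' : ∀ k w, seen.get? k = some w ↔ (k, w) ∈ m ++ [rowPair row] := by
          intro k w
          rw [hinv k w]
          constructor
          · intro h; exact List.mem_append.mpr (Or.inl h)
          · intro h
            rcases List.mem_append.mp h with h | h
            · exact h
            · simp [rowPair] at h
              rcases h with ⟨h1, h2⟩
              subst h1; subst h2
              have := (hinv _ v).mp hp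
              simpa [hv] using this
        have := ih (m ++ [rowPair row]) _ hinv' hm'
        simpa [clashLoopA, hp, hv, rowPair] using this
      · -- different label: return True; PairFun fails on the whole list
        have hnf : ¬ PairFun (m ++ (row :: rest).map rowPair) := by
          intro hF
          have h1 : (PySem.List.slice row none (some (-1)), v) ∈ m := (hinv _ v).mp hp
          have h2 : rowPair row ∈ (row :: rest).map rowPair := by simp
          exact hv (hF _ (List.mem_append.mpr (Or.inl h1)) _
            (List.mem_append.mpr (Or.inr h2)) rfl)
        simp only [List.map_cons] at hnf
        simp [clashLoopA, hp, hv, (pairFunB_false_iff _).mpr hnf]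

lemma check_for_clashes_py_eq (td : List (List String)) :
    check_for_clashes_py td = !PairFunB (td.map rowPair) := by
  have := clashLoopA_eq td [] PySem.Dict.empty (by simp [PySem.Dict.get?_empty]) (by intro p hp; simp at hp)
  simpa [check_for_clashes_py] using this

-- general fact: (l.map f).toFinset = l.toFinset.image f
lemma toFinset_map {α β : Type} [DecidableEq α] [DecidableEq β] (f : α → β) (l : List α) :
    (l.map f).toFinset = l.toFinset.image f := by
  ext x; simp

lemma dedup_length_eq_card {α : Type} [BEq α] [LawfulBEq α] [DecidableEq α] (l : List α) :
    (PySem.List.dedup l).length = l.toFinset.card := by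
  have h1 : (PySem.List.dedup l).toFinset = l.toFinset := by
    ext x; simp
  rw [← h1, List.toFinset_card_of_nodup (PySem.List.nodup_dedup l)]

lemma check_for_clashes_py_alt_eq (td : List (List String)) :
    check_for_clashes_py_alt td = !PairFunB (td.map rowPair) := by
  set l := td.map rowPair with hl
  have hfst : td.map (fun row => PySem.List.slice row none (some (-1))) = l.map Prod.fst := by
    simp [hl, List.map_map, rowPair]
  have hpairs : td.map (fun row =>
      (PySem.List.slice row none (some (-1)), PySem.List.pyGetD row (-1) "")) = l := by
    simp [hl, rowPair]
  unfold check_for_clashes_py_alt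
  rw [hfst, hpairs]
  have hcard1 := dedup_length_eq_card (l.map Prod.fst)
  have hcard2 := dedup_length_eq_card l
  rw [toFinset_map] at hcard1
  have hle : (Finset.image Prod.fst l.toFinset).card ≤ l.toFinset.card := Finset.card_image_le
  have hiff : PairFun l ↔ Set.InjOn (Prod.fst : List String × String → List String) ↑l.toFinset := by
    constructor
    · intro hF p hp q hq hpq
      simp only [List.coe_toFinset, Set.mem_setOf_eq] at hp hq
      exact Prod.ext hpq (hF p hp q hq hpq)
    · intro hI p hp q hq hpq
      have := hI (by simpa using hp) (by simpa using hq) hpq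
      exact congrArg Prod.snd this
  have hmain : (Finset.image Prod.fst l.toFinset).card < l.toFinset.card ↔ ¬ PairFun l := by
    constructor
    · intro hlt hF
      exact absurd (Finset.card_image_iff.mpr (hiff.mp hF)) (ne_of_lt hlt)
    · intro hF
      exact lt_of_le_of_ne hle (fun h => hF (hiff.mpr (Finset.card_image_iff.mp h)))
  have hlen : (PySem.Set.len (PySem.Set.ofList (l.map Prod.fst)) <
      PySem.Set.len (PySem.Set.ofList l)) ↔ ¬ PairFun l := by
    rw [← PySem.List.dedup_eq_ofList, ← PySem.List.dedup_eq_ofList]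
    rw [← hmain]
    simp only [PySem.Set.len, Nat.cast_lt]
    rw [hcard1, hcard2]
  show decide (PySem.Set.len (PySem.Set.ofList (l.map Prod.fst)) <
      PySem.Set.len (PySem.Set.ofList l)) = !PairFunB l
  by_cases hF : PairFun l
  · rw [decide_eq_false (fun h => (hlen.mp h) hF), (pairFunB_iff l).mpr hF]
    rfl
  · rw [decide_eq_true (hlen.mpr hF), (pairFunB_false_iff l).mpr hF]
    rfl

-- ===== VERDICT (by name: the statement is the Claim_ definition above) =====
theorem check_for_clashes_py_spec : Claim_equal_check_for_clashes_py := by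
  intro td _ _
  unfold Spec_check_for_clashes_py
  rw [check_for_clashes_py_eq, check_for_clashes_py_alt_eq]
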